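-- pv_equiv track=rewrite | github.com/CROSS-signature/CROSS-implementation | Additional_Implementations/Parameter_Generation_Scripts/compute_derived_parameters.py | tree_leaves
-- ===== SOURCE A (Python) =====
-- from math import comb,log2,ceil,floor
--
-- def clog2(a):
--     return max(int(ceil(log2(a))), 1)
--
-- def l_child(a):
--     return 2*a + 1
--
-- def r_child(a):
--     return 2*a + 2
--
-- def tree_leaves(T, offsets):
--     leaves = [0]*T
--     leaves_per_level = [0]*(clog2(T)+1)
--     start_index_per_level = [0]*(clog2(T)+1)
--     ctr = 0
--
--     remaining_leaves = T
--     depth = 0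
--     level = 0
--     root_node = 0
--     left_child = l_child(root_node) - offsets[level+depth]
--
--     while (remaining_leaves > 0):
--         depth = 1
--         subtree_found = False
--         while not subtree_found:
--             if (remaining_leaves <= 2**depth):
--                 for i in range(2**clog2(remaining_leaves)//2):
--                     leaves[ctr] = root_node if remaining_leaves==1 else left_child+i
--                     if (remaining_leaves==1):
--                         leaves_per_level[level] += 1
--                         start_index_per_level[level] = root_node if start_index_per_level[level] == 0 else start_index_per_level[level]
--                     else:
--                         leaves_per_level[level+depth] += 1
--                         start_index_per_level[level+depth] = left_child if start_index_per_level[level+depth] == 0 else start_index_per_level[level+depth]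
--                     ctr += 1
--                 root_node = r_child(root_node) - offsets[level]
--                 left_child = l_child(root_node) - offsets[level]
--                 level += 1
--                 remaining_leaves -= 2**clog2(remaining_leaves)//2
--                 subtree_found = True
--             else:
--                 left_child = l_child(left_child) - offsets[level+depth]
--                 depth += 1
--
--     # Now create array with start idx and number of leaves by removing zeros
--     cons_leaves = [i for i in leaves_per_level if i != 0]
--     start_index_per_level = [i for i in start_index_per_level if i != 0]
--
--     return leaves_per_level, len(cons_leaves), start_index_per_level[::-1], cons_leaves[::-1]
-- ===== SOURCE B (Python) =====
-- from math import comb, log2, ceil, floor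
--
-- def clog2(a):
--     return max(int(ceil(log2(a))), 1)
--
-- def tree_leaves(T, offsets):
--     # O(log^2 T): each subtree's leaves are accounted for with one addition
--     # instead of a per-leaf counting loop (the per-leaf 'leaves' array in A
--     # is never returned, so it is not built at all).
--     L = clog2(T) + 1
--     leaves_per_level = [0] * L
--     start_index_per_level = [0] * L
--     remaining = T
--     level = 0
--     root = 0
--     left = 2 * root + 1 - offsets[0]
--     while remaining > 0:
--         if remaining == 1:
--             leaves_per_level[level] += 1
--             if start_index_per_level[level] == 0:
--                 start_index_per_level[level] = root
--             cnt = 1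
--         else:
--             depth = clog2(remaining)
--             for d in range(1, depth):
--                 left = 2 * left + 1 - offsets[level + d]
--             cnt = 2 ** (depth - 1)
--             leaves_per_level[level + depth] += cnt
--             if start_index_per_level[level + depth] == 0:
--                 start_index_per_level[level + depth] = left
--         root = 2 * root + 2 - offsets[level]
--         left = 2 * root + 1 - offsets[level]
--         level += 1
--         remaining -= cnt
--     cons_leaves = [i for i in leaves_per_level if i != 0]
--     starts = [i for i in start_index_per_level if i != 0]
--     return leaves_per_level, len(cons_leaves), starts[::-1], cons_leaves[::-1]
-- ===== Notes on version B (the rewrite author's own statement) =====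
-- stated objective: faster
-- what changed: Each subtree of 2^(depth-1) leaves is accounted for with one addition (count += 2^(depth-1)) and one conditional start-index assignment, with the descent depth computed directly as clog2(remaining), so A's per-leaf counting loop and its T-sized scratch 'leaves' array (never returned) disappear.
import Mathlib
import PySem

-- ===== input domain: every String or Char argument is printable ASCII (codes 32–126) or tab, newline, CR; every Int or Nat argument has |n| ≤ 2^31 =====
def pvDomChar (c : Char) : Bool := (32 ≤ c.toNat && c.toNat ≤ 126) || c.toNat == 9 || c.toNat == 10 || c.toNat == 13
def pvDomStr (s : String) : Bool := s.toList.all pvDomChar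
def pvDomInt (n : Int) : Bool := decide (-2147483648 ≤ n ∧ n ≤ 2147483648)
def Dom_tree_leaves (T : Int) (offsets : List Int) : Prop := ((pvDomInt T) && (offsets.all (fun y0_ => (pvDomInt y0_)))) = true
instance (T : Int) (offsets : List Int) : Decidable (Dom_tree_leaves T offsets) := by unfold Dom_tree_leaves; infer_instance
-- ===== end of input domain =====

-- B replaces A's per-leaf counting loop (and A's unreturned T-sized 'leaves' scratch array)
-- by one addition and one conditional start-index assignment per subtree: O(log^2 T) instead of O(T).

-- shared small helpers (A's module helpers clog2 / l_child / r_child, and list get/set;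
-- getI/setI are exact for the nonnegative in-range indices the algorithm uses)
def clog2I (a : Int) : Int := max ((Nat.clog 2 a.toNat : Int)) 1
def pow2 (d : Int) : Int := 2 ^ d.toNat
def getI (xs : List Int) (i : Int) : Int := xs.getD i.toNat 0
def setI (xs : List Int) (i v : Int) : List Int := xs.set i.toNat v

theorem lt_pow2 (d : Int) : d < pow2 d := by
  unfold pow2
  have h1 : d ≤ (d.toNat : Int) := Int.self_le_toNat d
  have h2 : (d.toNat : Int) < (2 : Int) ^ d.toNat := by
    exact_mod_cast Nat.lt_two_pow_self (n := d.toNat)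
  omega

-- ===== PORT A =====
-- the inner 'while not subtree_found' loop
def innerA (offsets : List Int) (rem level : Int) (depth left : Int) : Int × Int :=
  if rem ≤ pow2 depth then (left, depth)
  else innerA offsets rem level (depth + 1) (2 * left + 1 - getI offsets (level + depth))
termination_by (rem - depth).toNat
decreasing_by
  have h1 : depth < pow2 depth := lt_pow2 depth
  omega

-- the body of A's 'for i in range(...)' loop; state = (leaves, leaves_per_level, start_index_per_level, ctr)
def subtreeFoldA (rem root leftc level depth : Int)
    (s : List Int × List Int × List Int × Int) (i : Int) :
    List Int × List Int × List Int × Int :=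
  let leaves := setI s.1 s.2.2.2 (if rem == 1 then root else leftc + i)
  if rem == 1 then
    (leaves, setI s.2.1 level (getI s.2.1 level + 1),
      if getI s.2.2.1 level == 0 then setI s.2.2.1 level root else s.2.2.1,
      s.2.2.2 + 1)
  else
    (leaves, setI s.2.1 (level + depth) (getI s.2.1 (level + depth) + 1),
      if getI s.2.2.1 (level + depth) == 0 then setI s.2.2.1 (level + depth) leftc else s.2.2.1,
      s.2.2.2 + 1)

theorem one_le_cnt (r : Int) : 1 ≤ PySem.Int.floordiv (pow2 (clog2I r)) 2 := by
  have hd : 1 ≤ clog2I r := le_max_right _ _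
  have h2 : 2 ≤ pow2 (clog2I r) := by
    unfold pow2
    have h3 : 1 ≤ (clog2I r).toNat := by omega
    calc (2 : Int) = ((2 ^ 1 : Nat) : Int) := by norm_num
    _ ≤ ((2 ^ (clog2I r).toNat : Nat) : Int) := by
      exact_mod_cast Nat.pow_le_pow_right (by norm_num) h3
  rw [PySem.Int.le_floordiv_iff_mul_le (by norm_num)]
  omega

-- A's outer 'while remaining_leaves > 0' loop
def outerA (offsets : List Int) (leaves lpl sipl : List Int) (ctr rem level root left : Int) :
    List Int × Int × List Int × List Int :=
  if 0 < rem then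
    let p := innerA offsets rem level 1 left
    let cnt := PySem.Int.floordiv (pow2 (clog2I rem)) 2
    let s := (PySem.List.pyRange 0 cnt 1).foldl (subtreeFoldA rem root p.1 level p.2)
              (leaves, lpl, sipl, ctr)
    let root' := 2 * root + 2 - getI offsets level
    let left' := 2 * root' + 1 - getI offsets level
    outerA offsets s.1 s.2.1 s.2.2.1 s.2.2.2 (rem - cnt) (level + 1) root' left'
  else
    let cons := lpl.filter (fun i => i != 0)
    let sipl' := sipl.filter (fun i => i != 0)
    (lpl, (cons.length : Int), sipl'.reverse, cons.reverse)
termination_by rem.toNat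
decreasing_by
  have h1 : 1 ≤ PySem.Int.floordiv (pow2 (clog2I rem)) 2 := one_le_cnt rem
  omega

def tree_leaves (T : Int) (offsets : List Int) : List Int × Int × List Int × List Int :=
  let leaves := List.replicate T.toNat 0
  let lpl := List.replicate (clog2I T + 1).toNat 0
  let sipl := List.replicate (clog2I T + 1).toNat 0
  let left := 2 * 0 + 1 - getI offsets (0 + 0)
  outerA offsets leaves lpl sipl 0 T 0 0 left

-- ===== PORT B =====
-- the body of B's 'for d in range(1, depth)' descent
def stepB (offsets : List Int) (level : Int) (l d : Int) : Int :=
  2 * l + 1 - getI offsets (level + d)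

theorem one_le_pow2 (d : Int) : 1 ≤ pow2 d := by
  unfold pow2
  exact_mod_cast Nat.one_le_two_pow

-- B's 'while remaining > 0' loop; state = (leaves_per_level, start_index_per_level)
def outerB (offsets : List Int) (lpl sipl : List Int) (rem level root left : Int) :
    List Int × Int × List Int × List Int :=
  if 0 < rem then
    if rem == 1 then
      let lpl' := setI lpl level (getI lpl level + 1)
      let sipl' := if getI sipl level == 0 then setI sipl level root else sipl
      let root' := 2 * root + 2 - getI offsets level
      outerB offsets lpl' sipl' (rem - 1) (level + 1) root' (2 * root' + 1 - getI offsets level)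
    else
      let depth := clog2I rem
      let leftd := (PySem.List.pyRange 1 depth 1).foldl (stepB offsets level) left
      let cnt := pow2 (depth - 1)
      let lpl' := setI lpl (level + depth) (getI lpl (level + depth) + cnt)
      let sipl' := if getI sipl (level + depth) == 0 then setI sipl (level + depth) leftd else sipl
      let root' := 2 * root + 2 - getI offsets level
      outerB offsets lpl' sipl' (rem - cnt) (level + 1) root' (2 * root' + 1 - getI offsets level)
  else
    let cons := lpl.filter (fun i => i != 0)
    let sipl' := sipl.filter (fun i => i != 0)
    (lpl, (cons.length : Int), sipl'.reverse, cons.reverse)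
termination_by rem.toNat
decreasing_by
  · omega
  · have h1 : 1 ≤ pow2 (clog2I rem - 1) := one_le_pow2 _
    omega

def tree_leaves_alt (T : Int) (offsets : List Int) : List Int × Int × List Int × List Int :=
  let lpl := List.replicate (clog2I T + 1).toNat 0
  let sipl := List.replicate (clog2I T + 1).toNat 0
  outerB offsets lpl sipl T 0 0 (2 * 0 + 1 - getI offsets 0)

-- ===== PRECONDITION & SPEC =====
-- Pre_ excludes exactly the inputs where A raises: T ≤ 0 (math domain error in log2) and
-- offsets shorter than bit_length(T) (IndexError: the largest offsets index A reads is bit_length(T)-1).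
def Pre_tree_leaves (T : Int) (offsets : List Int) : Prop :=
  1 ≤ T ∧ PySem.Int.bitLength T ≤ offsets.length
instance (T : Int) (offsets : List Int) : Decidable (Pre_tree_leaves T offsets) := by
  unfold Pre_tree_leaves; infer_instance

def pvWitness_tree_leaves : Int × List Int := (5, [0, 0, 0])

def Spec_tree_leaves (T : Int) (offsets : List Int) (out : List Int × Int × List Int × List Int) : Prop := out = tree_leaves_alt T offsets
instance (T : Int) (offsets : List Int) (out : List Int × Int × List Int × List Int) : Decidable (Spec_tree_leaves T offsets out) := by unfold Spec_tree_leaves; infer_instance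

-- ===== CLAIM (what is proved, stated in full; the proofs are below) =====
def Claim_equal_tree_leaves : Prop := ∀ (T : Int) (offsets : List Int), Dom_tree_leaves T offsets → Pre_tree_leaves T offsets → Spec_tree_leaves T offsets (tree_leaves T offsets)

-- ===== LEMMAS AND PROOFS =====

-- conditional start-index assignment, as performed once per subtree by B
def bumpS (sipl : List Int) (idx v : Int) : List Int :=
  if getI sipl idx == 0 then setI sipl idx v else sipl

theorem bumpS_idem (sipl : List Int) (idx v : Int) :
    bumpS (bumpS sipl idx v) idx v = bumpS sipl idx v := by
  unfold bumpS
  split_ifs <;> simp [setI, List.set_set]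

theorem getI_setI_eq (l : List Int) (i x : Int) (h : i.toNat < l.length) :
    getI (setI l i x) i = x := by
  simp [getI, setI, List.getD, h]

theorem setI_out (l : List Int) (i x : Int) (h : l.length ≤ i.toNat) : setI l i x = l :=
  List.set_eq_of_length_le h

theorem setI_accum (l : List Int) (i a b : Int) :
    setI (setI l i (getI l i + a)) i (getI (setI l i (getI l i + a)) i + b)
      = setI l i (getI l i + (a + b)) := by
  by_cases h : i.toNat < l.length
  · rw [getI_setI_eq l i _ h]
    unfold setI
    rw [List.set_set]
    congr 1
    ring
  · rw [setI_out l i _ (by omega), setI_out l i _ (by omega), setI_out l i _ (by omega)]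

-- the cumulative effect of A's per-leaf loop on the two returned accumulators
theorem fold_generic (idx v : Int)
    (f : (List Int × List Int × List Int × Int) → Int → (List Int × List Int × List Int × Int))
    (hf : ∀ s i, ((f s i).2.1 = setI s.2.1 idx (getI s.2.1 idx + 1)) ∧
                 ((f s i).2.2.1 = bumpS s.2.2.1 idx v)) :
    ∀ (l : List Int), l ≠ [] → ∀ (s : List Int × List Int × List Int × Int),
      ((l.foldl f s).2.1 = setI s.2.1 idx (getI s.2.1 idx + (l.length : Int))) ∧
      ((l.foldl f s).2.2.1 = bumpS s.2.2.1 idx v) := by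
  intro l
  induction l with
  | nil => intro h; exact absurd rfl h
  | cons i is ih =>
    intro _ s
    by_cases his : is = []
    · subst his
      simp only [List.foldl_cons, List.foldl_nil, List.length_cons, List.length_nil]
      rcases hf s i with ⟨h1, h2⟩
      exact ⟨by rw [h1]; norm_num, h2⟩
    · rcases ih his (f s i) with ⟨h1, h2⟩
      rcases hf s i with ⟨h3, h4⟩
      simp only [List.foldl_cons]
      constructor
      · rw [h1, h3, setI_accum]
        congr 1
        push_cast [List.length_cons]
        ring
      · rw [h2, h4, bumpS_idem]

-- clog2 bracket: for d ≥ 1, 'rem ≤ 2**d' is exactly 'clog2(rem) ≤ d'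
theorem le_pow2_iff (rem d : Int) (_hr : 1 ≤ rem) (hd : 1 ≤ d) :
    (rem ≤ pow2 d ↔ clog2I rem ≤ d) := by
  unfold pow2 clog2I
  have h1 : rem ≤ ((2 ^ d.toNat : Nat) : Int) ↔ rem.toNat ≤ 2 ^ d.toNat := by
    rw [← Int.toNat_le]
  have h2 : rem.toNat ≤ 2 ^ d.toNat ↔ Nat.clog 2 rem.toNat ≤ d.toNat :=
    (Nat.clog_le_iff_le_pow (by norm_num)).symm
  constructor
  · intro h
    have := (h2.mp (h1.mp (by exact_mod_cast h)))
    omega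
  · intro h
    have h3 : Nat.clog 2 rem.toNat ≤ d.toNat := by omega
    have := h1.mpr (h2.mpr h3)
    exact_mod_cast this

-- A's inner descent = B's fold over range(1, depth), stopping exactly at depth = clog2(rem)
theorem inner_eq (offsets : List Int) (rem level : Int) (hr : 1 ≤ rem) :
    ∀ (n : Nat) (d left : Int), 1 ≤ d → d ≤ clog2I rem → (clog2I rem - d).toNat = n →
      innerA offsets rem level d left
        = ((PySem.List.pyRange d (clog2I rem) 1).foldl (stepB offsets level) left, clog2I rem) := by
  intro n
  induction n with
  | zero =>
    intro d left hd1 hd2 hn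
    have hde : d = clog2I rem := by omega
    rw [innerA, if_pos ((le_pow2_iff rem d hr hd1).mpr (le_of_eq hde.symm)), hde,
      PySem.List.pyRange_one_eq_nil le_rfl]
    rfl
  | succ n ih =>
    intro d left hd1 hd2 hn
    have hlt : d < clog2I rem := by omega
    have hno : ¬ rem ≤ pow2 d := fun h => absurd ((le_pow2_iff rem d hr hd1).mp h) (by omega)
    rw [innerA, if_neg hno, PySem.List.pyRange_one_cons hlt, List.foldl_cons,
      ih (d + 1) (2 * left + 1 - getI offsets (level + d)) (by omega) (by omega) (by omega)]
    rfl

theorem clog2I_one : clog2I 1 = 1 := by decide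

theorem pow2_pred_cnt (d : Int) (h : 1 ≤ d) :
    PySem.Int.floordiv (pow2 d) 2 = pow2 (d - 1) := by
  unfold pow2
  have h1 : d.toNat = (d - 1).toNat + 1 := by omega
  rw [h1, pow_succ, PySem.Int.floordiv_eq_ediv_of_pos (by norm_num)]
  exact Int.mul_ediv_cancel _ (by norm_num)

-- main loop equivalence, by strong induction on remaining
theorem outer_eq (offsets : List Int) : ∀ (n : Nat) (rem : Int), rem.toNat = n →
    ∀ (level root left : Int) (leaves lpl sipl : List Int) (ctr : Int),
      outerA offsets leaves lpl sipl ctr rem level root left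
        = outerB offsets lpl sipl rem level root left := by
  intro n
  induction n using Nat.strong_induction_on with
  | _ n ih =>
    intro rem hn level root left leaves lpl sipl ctr
    by_cases hpos : 0 < rem
    · have hr1 : 1 ≤ rem := hpos
      rw [outerA, if_pos hpos, outerB, if_pos hpos]
      by_cases h1 : rem = 1
      · -- the remaining_leaves == 1 subtree
        subst h1
        have hinner : innerA offsets 1 level 1 left = (left, 1) := by
          rw [inner_eq offsets 1 level (by norm_num) 0 1 left le_rfl (by decide) (by decide)]
          simp [clog2I_one, PySem.List.pyRange_one_eq_nil le_rfl]
        have hcnt : PySem.Int.floordiv (pow2 (clog2I 1)) 2 = 1 := by decide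
        have hrange : PySem.List.pyRange 0 1 1 = [0] := by decide
        simp only [hinner, hcnt, hrange, List.foldl_cons, List.foldl_nil, subtreeFoldA,
          BEq.rfl, if_true]
        exact ih 0 (by omega) (1 - 1) (by omega) _ _ _ _ _ _ _
      · -- a full subtree of 2^(depth-1) leaves
        have hD1 : 1 ≤ clog2I rem := le_max_right _ _
        have hinner : innerA offsets rem level 1 left
            = ((PySem.List.pyRange 1 (clog2I rem) 1).foldl (stepB offsets level) left,
               clog2I rem) :=
          inner_eq offsets rem level hr1 (clog2I rem - 1).toNat 1 left le_rfl hD1 rfl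
        have hcnt : PySem.Int.floordiv (pow2 (clog2I rem)) 2 = pow2 (clog2I rem - 1) :=
          pow2_pred_cnt _ hD1
        have hc1 : 1 ≤ pow2 (clog2I rem - 1) := one_le_pow2 _
        have hbeq : (rem == 1) = false := by simpa using h1
        have hfold := fold_generic (level + clog2I rem)
          ((PySem.List.pyRange 1 (clog2I rem) 1).foldl (stepB offsets level) left)
          (subtreeFoldA rem root
            ((PySem.List.pyRange 1 (clog2I rem) 1).foldl (stepB offsets level) left)
            level (clog2I rem))
          (by
            intro s i
            refine ⟨?_, ?_⟩ <;> simp [subtreeFoldA, hbeq, bumpS])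
          (PySem.List.pyRange 0 (pow2 (clog2I rem - 1)) 1)
          (by rw [PySem.List.pyRange_one_cons (by omega)]; exact List.cons_ne_nil _ _)
          (leaves, lpl, sipl, ctr)
        rcases hfold with ⟨hfl, hfs⟩
        rw [PySem.List.length_pyRange_one] at hfl
        have hlen : (((pow2 (clog2I rem - 1) - 0).toNat : Int)) = pow2 (clog2I rem - 1) := by
          omega
        rw [hlen] at hfl
        simp only [hinner, hcnt, hbeq, Bool.false_eq_true, if_false]
        rw [ih (rem - pow2 (clog2I rem - 1)).toNat (by omega) _ rfl]
        rw [hfl, hfs]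
        rfl
    · rw [outerA, if_neg hpos, outerB, if_neg hpos]

-- ===== VERDICT (by name: the statement is the Claim_ definition above) =====
theorem tree_leaves_spec : Claim_equal_tree_leaves := by
  intro T offsets _ hpre
  unfold Spec_tree_leaves tree_leaves tree_leaves_alt
  exact outer_eq offsets T.toNat T rfl 0 0 _ _ _ _ 0
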